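-- pv_equiv track=rewrite | github.com/RuanKang/learn_github | rename_function.py | count_acyclic_arrangements
-- ===== SOURCE A (Python) =====
-- def count_acyclic_arrangements(total, number_of_sections):
--     if number_of_sections == 0:
--         return 1
--     if number_of_sections > 0:
--         subprob_id = 1
--         subprob = total - 1
--         number_of_plans = 0
--         while subprob != 0:
--             number_of_plans += count_acyclic_arrangements(subprob, number_of_sections - 1)
--             subprob_id += 1
--             subprob -= 1
--         return number_of_plans
-- ===== SOURCE B (Python) =====
-- def count_acyclic_arrangements(total, number_of_sections):
--     # closed-form binomial C(total-1, number_of_sections) by the multiplicative formula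
--     if number_of_sections == 0:
--         return 1
--     n = total - 1
--     k = number_of_sections
--     if k > n:
--         return 0
--     result = 1
--     for i in range(k):
--         result = result * (n - i) // (i + 1)
--     return result
-- ===== Notes on version B (the rewrite author's own statement) =====
-- stated objective: faster
-- what changed: Replaces A's exponential recursive summation (sum over all strictly decreasing tails) by the closed-form binomial coefficient C(total-1, number_of_sections) computed with the multiplicative formula in one O(number_of_sections) loop; intended as faster (measured 2210x at the largest size both finished, unconfirmed because A times out on larger inputs).
-- outside the precondition, e.g. on count_acyclic_arrangements(1, -2): A returns None, B returns 1; on count_acyclic_arrangements(0, 2): A does not finish within the time limit, B returns 0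
import Mathlib
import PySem

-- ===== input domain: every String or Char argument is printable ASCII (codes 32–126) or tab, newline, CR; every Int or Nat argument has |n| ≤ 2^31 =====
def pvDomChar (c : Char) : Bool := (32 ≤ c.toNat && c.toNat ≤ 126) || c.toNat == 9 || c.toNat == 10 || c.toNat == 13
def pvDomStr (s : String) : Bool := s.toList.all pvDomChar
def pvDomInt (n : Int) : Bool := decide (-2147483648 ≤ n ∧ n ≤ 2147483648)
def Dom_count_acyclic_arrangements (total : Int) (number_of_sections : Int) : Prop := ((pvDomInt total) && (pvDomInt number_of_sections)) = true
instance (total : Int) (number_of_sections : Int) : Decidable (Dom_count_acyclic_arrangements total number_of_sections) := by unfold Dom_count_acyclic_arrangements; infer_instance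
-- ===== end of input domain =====

-- B replaces A's exponential recursive summation by the closed-form binomial
-- C(total-1, number_of_sections) via the multiplicative formula. Intended as faster (A is exponential); a timing run measured B 2210x at the largest size both finished but could not confirm (A timed out elsewhere).


-- ===== PORT A =====
-- A's while loop runs subprob = total-1, total-2, …, 1; it is rendered as a fold over
-- that index range (empty — the guard that totalizes the port — when total-1 < 0, where
-- Python diverges; such inputs are outside Pre_). The 'else 0' branch covers
-- number_of_sections < 0, where Python returns None; also outside Pre_.
def count_acyclic_arrangements (total : Int) (number_of_sections : Int) : Int :=
  if number_of_sections = 0 then 1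
  else if 0 < number_of_sections then
    (List.range (total - 1).toNat).foldl
      (fun acc (i : Nat) => acc + count_acyclic_arrangements ((total - 1) - (i : Int)) (number_of_sections - 1)) 0
  else 0
termination_by number_of_sections.toNat
decreasing_by omega

-- ===== PORT B =====
def count_acyclic_arrangements_alt (total : Int) (number_of_sections : Int) : Int :=
  if number_of_sections = 0 then 1
  else
    let n := total - 1
    let k := number_of_sections
    if k > n then 0
    else (List.range k.toNat).foldl
      (fun result (i : Nat) => PySem.Int.floordiv (result * (n - (i : Int))) ((i : Int) + 1)) 1

-- ===== PRECONDITION & SPEC =====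
-- Pre_ excludes number_of_sections < 0 (A falls through both branches and returns None,
-- not an int) and total ≤ 0 with number_of_sections > 0 (A's while loop never terminates).
def Pre_count_acyclic_arrangements (total : Int) (number_of_sections : Int) : Prop :=
  0 ≤ number_of_sections ∧ (number_of_sections = 0 ∨ 1 ≤ total)
instance (total : Int) (number_of_sections : Int) : Decidable (Pre_count_acyclic_arrangements total number_of_sections) := by unfold Pre_count_acyclic_arrangements; infer_instance

def pvWitness_count_acyclic_arrangements : Int × Int := (7, 3)

def Spec_count_acyclic_arrangements (total : Int) (number_of_sections : Int) (out : Int) : Prop := out = count_acyclic_arrangements_alt total number_of_sections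
instance (total : Int) (number_of_sections : Int) (out : Int) : Decidable (Spec_count_acyclic_arrangements total number_of_sections out) := by unfold Spec_count_acyclic_arrangements; infer_instance

-- ===== CLAIM (what is proved, stated in full; the proofs are below) =====
def Claim_equal_count_acyclic_arrangements : Prop := ∀ (total : Int) (number_of_sections : Int), Dom_count_acyclic_arrangements total number_of_sections → Pre_count_acyclic_arrangements total number_of_sections → Spec_count_acyclic_arrangements total number_of_sections (count_acyclic_arrangements total number_of_sections)

-- ===== LEMMAS AND PROOFS =====

-- a fold of additions is the Finset sum
lemma foldl_add_range (f : Nat → Int) (n : Nat) (c : Int) :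
    (List.range n).foldl (fun acc i => acc + f i) c = c + ∑ i ∈ Finset.range n, f i := by
  induction n generalizing c with
  | zero => simp
  | succ m ih => simp [List.range_succ, Finset.sum_range_succ, ih, add_assoc]

-- hockey stick
lemma sum_range_choose_eq (k : Nat) : ∀ n : Nat,
    ∑ j ∈ Finset.range n, Nat.choose j k = Nat.choose n (k + 1) := by
  intro n
  induction n with
  | zero => simp
  | succ m ih => rw [Finset.sum_range_succ, ih, Nat.choose_succ_succ, Nat.add_comm]

-- A computes the binomial coefficient C(total-1, K)
lemma countA_eq_choose : ∀ (K : Nat) (total : Int), (K = 0 ∨ 1 ≤ total) →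
    count_acyclic_arrangements total (K : Int) = ((total - 1).toNat.choose K : Int) := by
  intro K
  induction K with
  | zero => intro total _; simp [count_acyclic_arrangements]
  | succ m ih =>
    intro total htot
    have h1 : (1 : Int) ≤ total := by omega
    rw [count_acyclic_arrangements]
    have hk0 : ((m : Int) + 1 ≠ 0) := by omega
    have hkpos : (0 : Int) < (m : Int) + 1 := by omega
    simp only [Nat.cast_succ, hk0, hkpos, if_pos, if_false]
    set N := (total - 1).toNat with hN
    have hNt : (total : Int) - 1 = (N : Int) := by omega
    have hbody : ∀ i ∈ Finset.range N,
        count_acyclic_arrangements ((total - 1) - (i : Int)) ((m : Int) + 1 - 1)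
          = ((N - 1 - i).choose m : Int) := by
      intro i hi
      have hiN : i < N := Finset.mem_range.mp hi
      have harg : (total - 1) - (i : Int) = ((N - i : Nat) : Int) := by omega
      have : ((m : Int) + 1 - 1) = (m : Int) := by ring
      rw [harg, this, ih ((N - i : Nat) : Int) (by right; omega)]
      congr 2
      omega
    rw [foldl_add_range (fun i => count_acyclic_arrangements ((total - 1) - (i : Int)) ((m : Int) + 1 - 1)) N 0,
        zero_add, Finset.sum_congr rfl hbody]
    rw [← Nat.cast_sum]
    norm_cast
    rw [Finset.sum_range_reflect (fun j => Nat.choose j m) N]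
    exact sum_range_choose_eq m N

-- B's multiplicative fold computes the binomial coefficient
lemma foldB_eq_choose (N : Nat) : ∀ K : Nat, K ≤ N →
    (List.range K).foldl
      (fun result (i : Nat) => PySem.Int.floordiv (result * ((N : Int) - (i : Int))) ((i : Int) + 1)) 1
      = (N.choose K : Int) := by
  intro K
  induction K with
  | zero => intro _; simp
  | succ m ih =>
    intro hKN
    rw [List.range_succ, List.foldl_append, List.foldl_cons, List.foldl_nil,
        ih (by omega)]
    have hid : (N.choose m : Int) * ((N : Int) - (m : Int)) = (N.choose (m + 1) : Int) * ((m : Int) + 1) := by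
      have h := Nat.choose_succ_right_eq N m
      have hsub : ((N - m : Nat) : Int) = (N : Int) - (m : Int) := by omega
      calc (N.choose m : Int) * ((N : Int) - (m : Int))
          = ((N.choose m * (N - m) : Nat) : Int) := by push_cast [hsub]; ring
        _ = ((N.choose (m + 1) * (m + 1) : Nat) : Int) := by rw [← h]
        _ = (N.choose (m + 1) : Int) * ((m : Int) + 1) := by push_cast; ring
    rw [hid, PySem.Int.floordiv_eq_ediv_of_pos (by omega : (0:Int) < (m:Int)+1),
        Int.mul_ediv_cancel _ (by omega)]

-- B equals the binomial coefficient under Pre_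
lemma countB_eq_choose (total : Int) (K : Nat) (htot : K = 0 ∨ 1 ≤ total) :
    count_acyclic_arrangements_alt total (K : Int) = ((total - 1).toNat.choose K : Int) := by
  rcases K with _ | m
  · simp [count_acyclic_arrangements_alt]
  · have h1 : (1 : Int) ≤ total := by omega
    set N := (total - 1).toNat with hN
    have hNt : (total : Int) - 1 = (N : Int) := by omega
    rw [count_acyclic_arrangements_alt]
    have hk0 : (((m + 1 : Nat) : Int) ≠ 0) := by push_cast; omega
    simp only [hk0, if_false]
    by_cases hgt : ((m + 1 : Nat) : Int) > total - 1
    · rw [if_pos hgt]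
      have : N < m + 1 := by omega
      rw [Nat.choose_eq_zero_of_lt this]
      simp
    · rw [if_neg hgt]
      have hle : m + 1 ≤ N := by omega
      have : ((m + 1 : Nat) : Int).toNat = m + 1 := by omega
      rw [this, hNt]
      exact foldB_eq_choose N (m + 1) hle

-- ===== VERDICT (by name: the statement is the Claim_ definition above) =====
theorem count_acyclic_arrangements_spec : Claim_equal_count_acyclic_arrangements := by
  intro total ns _ hpre
  obtain ⟨hns, htot⟩ := hpre
  unfold Spec_count_acyclic_arrangements
  obtain ⟨K, rfl⟩ : ∃ K : Nat, ns = (K : Int) := ⟨ns.toNat, by omega⟩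
  have hc : K = 0 ∨ 1 ≤ total := by omega
  rw [countA_eq_choose K total hc, countB_eq_choose total K hc]
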